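-- pv_equiv track=rewrite | github.com/404neko/Shimarisu | libs/util.py | url_completion
-- ===== SOURCE A (Python) =====
-- def url_completion(url,default='http'):
--     url_part = url[:8]
--     if url[:7]=='http://' or url_part=='https://':
--         return url
--     else:
--         pass
--     if url_part.find('s:')!=-1:
--         to_add = 'http'
--         while to_add!='':
--             to_return = to_add+url
--             if to_return[:7]!='https:/':
--                 to_add=to_add[:-1]
--                 continue
--             else:
--                 return to_return
--     elif url_part.find('p:')!=-1:
--         to_add = 'htt'
--         while to_add!='':
--             to_return = to_add+url
--             if to_return[:7]!='http://':
--                 to_add=to_add[:-1]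
--                 continue
--             else:
--                 return to_return
--     else:
--         to_add = 'http://'
--         while to_add!='':
--             to_return = to_add+url
--             if to_return[:7]!='http://':
--                 to_add=to_add[:-1]
--                 continue
--             else:
--                 while to_return.find('///')!=-1:
--                     to_return = to_return.replace('///','//')
--                 return to_return
--             to_add=to_add[:-1]
-- ===== SOURCE B (Python) =====
-- def url_completion(url, default='http'):
--     part = url[:8]
--     if url[:7] == 'http://' or part == 'https://':
--         return url
--     if 's:' in part:
--         if url.startswith('s:/'):
--             return 'http' + url
--         elif url.startswith('ps:/'):
--             return 'htt' + url
--         elif url.startswith('tps:/'):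
--             return 'ht' + url
--         elif url.startswith('ttps:/'):
--             return 'h' + url
--         else:
--             return None
--     elif 'p:' in part:
--         if url.startswith('p://'):
--             return 'htt' + url
--         elif url.startswith('tp://'):
--             return 'ht' + url
--         elif url.startswith('ttp://'):
--             return 'h' + url
--         else:
--             return None
--     else:
--         to_return = 'http://' + url
--         while '///' in to_return:
--             to_return = to_return.replace('///', '//')
--         return to_return
-- ===== Notes on version B (the rewrite author's own statement) =====
-- stated objective: simpler
-- what changed: Replaced A's three shrinking-prefix while loops (repeatedly chopping the candidate scheme string and re-testing the first 7 characters) by a direct dispatch on the URL's prefix literals; the slash-collapse loop and the guard order are kept.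
import Mathlib
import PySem

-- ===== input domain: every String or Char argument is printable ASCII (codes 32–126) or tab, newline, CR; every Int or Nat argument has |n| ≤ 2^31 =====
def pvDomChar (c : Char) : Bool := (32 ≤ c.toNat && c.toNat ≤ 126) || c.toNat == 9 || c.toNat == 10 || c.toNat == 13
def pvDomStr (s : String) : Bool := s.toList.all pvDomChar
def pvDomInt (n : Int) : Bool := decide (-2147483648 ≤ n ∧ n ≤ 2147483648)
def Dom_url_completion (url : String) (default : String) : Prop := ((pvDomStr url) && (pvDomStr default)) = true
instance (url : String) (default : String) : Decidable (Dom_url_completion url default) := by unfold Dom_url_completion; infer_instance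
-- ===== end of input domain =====

-- B replaces A's shrinking-prefix while loops by a direct prefix dispatch (simpler); the `default` parameter is unused in both, as in A.

-- ===== PORT A =====
-- shared between the two ports (both Pythons contain this identical loop):
-- while to_return.find('///') != -1: to_return = to_return.replace('///','//')
-- fuel only makes the loop total; each replace strictly shortens, so fuel = length suffices
def pvCollapse : Nat → List Char → List Char
  | 0, s => s
  | fuel+1, s =>
    if PySem.Chars.find s ['/', '/', '/'] ≠ -1 then
      pvCollapse fuel (PySem.Chars.replace s ['/', '/', '/'] ['/', '/'])
    else s

-- while to_add != '': to_return = to_add+url; if to_return[:7] != target: to_add = to_add[:-1] else: return to_return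
-- (to_return[:7] with the nonneg literal bound is take 7, PySem.List.slice_to_natCast)
def pvTryAdd (to_add url target : List Char) : Option (List Char) :=
  if h : to_add = [] then none
  else
    let to_return := to_add ++ url
    if to_return.take 7 ≠ target then pvTryAdd to_add.dropLast url target
    else some to_return
termination_by to_add.length
decreasing_by have := List.length_pos_of_ne_nil h; simp [List.length_dropLast]; omega

def url_completion (url : String) (default : String) : Option String :=
  let u := url.toList
  let url_part := u.take 8        -- url[:8]
  if u.take 7 = "http://".toList ∨ url_part = "https://".toList then some url
  else if PySem.Chars.find url_part "s:".toList ≠ -1 then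
    (pvTryAdd "http".toList u "https:/".toList).map String.ofList
  else if PySem.Chars.find url_part "p:".toList ≠ -1 then
    (pvTryAdd "htt".toList u "http://".toList).map String.ofList
  else
    let s := "http://".toList ++ u
    some (String.ofList (pvCollapse s.length s))

-- ===== PORT B =====
def url_completion_alt (url : String) (default : String) : Option String :=
  let u := url.toList
  let part := u.take 8            -- url[:8]
  if u.take 7 = "http://".toList ∨ part = "https://".toList then some url
  else if PySem.Chars.isIn "s:".toList part then
    if PySem.Chars.startswith u "s:/".toList then some (String.ofList ("http".toList ++ u))
    else if PySem.Chars.startswith u "ps:/".toList then some (String.ofList ("htt".toList ++ u))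
    else if PySem.Chars.startswith u "tps:/".toList then some (String.ofList ("ht".toList ++ u))
    else if PySem.Chars.startswith u "ttps:/".toList then some (String.ofList ("h".toList ++ u))
    else none
  else if PySem.Chars.isIn "p:".toList part then
    if PySem.Chars.startswith u "p://".toList then some (String.ofList ("htt".toList ++ u))
    else if PySem.Chars.startswith u "tp://".toList then some (String.ofList ("ht".toList ++ u))
    else if PySem.Chars.startswith u "ttp://".toList then some (String.ofList ("h".toList ++ u))
    else none
  else
    let s := "http://".toList ++ u
    some (String.ofList (pvCollapse s.length s))

-- ===== PRECONDITION & SPEC =====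
def Spec_url_completion (url : String) (default : String) (out : Option String) : Prop := out = url_completion_alt url default
instance (url : String) (default : String) (out : Option String) : Decidable (Spec_url_completion url default out) := by unfold Spec_url_completion; infer_instance

-- ===== CLAIM (what is proved, stated in full; the proofs are below) =====
def Claim_equal_url_completion : Prop := ∀ (url : String) (default : String), Dom_url_completion url default → Spec_url_completion url default (url_completion url default)

-- ===== LEMMAS AND PROOFS =====

-- A's shrinking loop in the 's:' branch, characterised by the prefix of url it inspects
theorem pvTryAdd_s (u : List Char) :
    pvTryAdd "http".toList u "https:/".toList =
      if PySem.Chars.startswith u "s:/".toList then some ("http".toList ++ u)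
      else if PySem.Chars.startswith u "ps:/".toList then some ("htt".toList ++ u)
      else if PySem.Chars.startswith u "tps:/".toList then some ("ht".toList ++ u)
      else if PySem.Chars.startswith u "ttps:/".toList then some ("h".toList ++ u)
      else none := by
  rw [pvTryAdd, pvTryAdd, pvTryAdd, pvTryAdd, pvTryAdd]
  simp [PySem.Chars.startswith_iff, List.prefix_iff_eq_take]
  split_ifs <;> simp_all

theorem pvTryAdd_p (u : List Char) :
    pvTryAdd "htt".toList u "http://".toList =
      if PySem.Chars.startswith u "p://".toList then some ("htt".toList ++ u)
      else if PySem.Chars.startswith u "tp://".toList then some ("ht".toList ++ u)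
      else if PySem.Chars.startswith u "ttp://".toList then some ("h".toList ++ u)
      else none := by
  rw [pvTryAdd, pvTryAdd, pvTryAdd, pvTryAdd]
  simp [PySem.Chars.startswith_iff, List.prefix_iff_eq_take]
  split_ifs <;> simp_all

-- ===== VERDICT (by name: the statement is the Claim_ definition above) =====
theorem url_completion_spec : Claim_equal_url_completion := by
  intro url default _
  unfold Spec_url_completion url_completion url_completion_alt
  simp only [PySem.Chars.find_ne_neg_one_iff, ← PySem.Chars.isIn_iff_infix,
    pvTryAdd_s, pvTryAdd_p]
  split_ifs <;> rfl
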